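-- pv_equiv track=rewrite | github.com/yijiangh/pybullet_planning | src/pybullet_planning/motion_planners/utils.py | bisect
-- ===== SOURCE A (Python) =====
-- from collections import deque
--
-- def bisect(sequence):
--     sequence = list(sequence)
--     indices = set()
--     queue = deque([(0, len(sequence)-1)])
--     while queue:
--         lower, higher = queue.popleft()
--         if lower > higher:
--             continue
--         index = int((lower + higher) / 2.)
--         assert index not in indices
--         #if is_even(higher - lower):
--         yield sequence[index]
--         queue.extend([
--             (lower, index-1),
--             (index+1, higher),
--         ])
-- ===== SOURCE B (Python) =====
-- def bisect(sequence):
--     # Divide and conquer: recursively build the per-depth level lists of the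
--     # midpoint tree (merging left/right subtree levels depth-wise), then
--     # emit them depth by depth. No queue/frontier is maintained.
--     sequence = list(sequence)
--
--     def merge(left, right):
--         if not left:
--             return right
--         if not right:
--             return left
--         return [left[0] + right[0]] + merge(left[1:], right[1:])
--
--     def levels(lower, higher):
--         if lower > higher:
--             return []
--         index = (lower + higher) // 2
--         return [[sequence[index]]] + merge(levels(lower, index - 1),
--                                            levels(index + 1, higher))
--
--     for level in levels(0, len(sequence) - 1):
--         yield from level
-- ===== Notes on version B (the rewrite author's own statement) =====
-- stated objective: alternative
-- what changed: Replaces the deque-driven BFS with a recursive divide-and-conquer: each interval builds its subtree's per-depth level lists, left and right child level lists are merged depth-wise, and the result is emitted level by level, so no queue or frontier exists.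
import Mathlib
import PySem

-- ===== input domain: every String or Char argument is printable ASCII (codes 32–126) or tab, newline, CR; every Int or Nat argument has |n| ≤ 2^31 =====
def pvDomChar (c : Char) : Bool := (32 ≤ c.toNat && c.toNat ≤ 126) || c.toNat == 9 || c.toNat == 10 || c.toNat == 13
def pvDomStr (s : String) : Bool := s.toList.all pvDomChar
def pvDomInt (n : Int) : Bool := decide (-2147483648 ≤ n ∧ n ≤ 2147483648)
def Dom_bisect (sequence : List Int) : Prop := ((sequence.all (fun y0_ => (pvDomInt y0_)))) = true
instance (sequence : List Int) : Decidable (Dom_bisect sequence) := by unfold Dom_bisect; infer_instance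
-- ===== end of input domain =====

-- B replaces A's deque-driven BFS by recursive divide-and-conquer: each interval builds
-- its subtree's per-depth level lists, children's level lists are merged depth-wise, and
-- the levels are emitted in order; no queue exists. Both Pythons are generators;
-- equivalence is about the list of yielded values.

-- ===== PORT A =====
-- the while-queue loop of A. `int((lower+higher)/2.)` is truncating division, and on every
-- reachable interval lower + higher ≥ 0 (lower ≥ 0 when lower ≤ higher), where truncation = floor,
-- so it is ported as PySem.Int.floordiv. sequence[index] is always in range (0 ≤ lower ≤ index ≤
-- higher < len), so the IndexError arm `.getD 0` is never taken. A's `indices` set is never added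
-- to, so its assert is vacuous and is not ported. The Nat argument is FUEL, a totality guard only:
-- one unit per pop; 2*len+1 units suffice (proved adequate by the lemmas below).
def bisectLoop (seq : List Int) : Nat → List (Int × Int) → List Int
  | 0, _ => []
  | _ + 1, [] => []
  | fuel + 1, (l, h) :: rest =>
    if l > h then bisectLoop seq fuel rest
    else
      (PySem.List.pyGet? seq (PySem.Int.floordiv (l + h) 2)).getD 0 ::
        bisectLoop seq fuel (rest ++ [(l, PySem.Int.floordiv (l + h) 2 - 1),
                                      (PySem.Int.floordiv (l + h) 2 + 1, h)])

def bisect (sequence : List Int) : List Int :=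
  bisectLoop sequence (2 * sequence.length + 1) [(0, (sequence.length : Int) - 1)]

-- ===== PORT B =====
-- B's recursive `merge`: combine two per-depth level lists depth-wise
def pvMerge : List (List Int) → List (List Int) → List (List Int)
  | [], right => right
  | a :: left, [] => a :: left
  | a :: left, b :: right => (a ++ b) :: pvMerge left right

-- B's recursive `levels`: the per-depth level lists of the interval's midpoint tree.
-- Terminates because each child interval is strictly shorter (midpoint bounds lemma).
def altLevels (seq : List Int) (l h : Int) : List (List Int) :=
  if l > h then []
  else
    [(PySem.List.pyGet? seq (PySem.Int.floordiv (l + h) 2)).getD 0] ::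
      pvMerge (altLevels seq l (PySem.Int.floordiv (l + h) 2 - 1))
              (altLevels seq (PySem.Int.floordiv (l + h) 2 + 1) h)
termination_by (h - l + 1).toNat
decreasing_by
  all_goals
    have := PySem.Int.floordiv_two_mid_bounds (lo := l) (hi := h) (by omega)
    omega

-- the final `for level in …: yield from level` = flatten
def bisect_alt (sequence : List Int) : List Int :=
  (altLevels sequence 0 ((sequence.length : Int) - 1)).flatten

-- ===== PRECONDITION & SPEC =====
def Spec_bisect (sequence : List Int) (out : List Int) : Prop := out = bisect_alt sequence
instance (sequence : List Int) (out : List Int) : Decidable (Spec_bisect sequence out) := by unfold Spec_bisect; infer_instance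

-- ===== CLAIM =====
def Claim_equal_bisect : Prop := ∀ (sequence : List Int), Dom_bisect sequence → Spec_bisect sequence (bisect sequence)

-- ===== LEMMAS AND PROOFS =====

-- what one queue-level yields / spawns
def pvY (seq : List Int) (q : List (Int × Int)) : List Int :=
  q.flatMap fun p =>
    if p.1 > p.2 then []
    else [(PySem.List.pyGet? seq (PySem.Int.floordiv (p.1 + p.2) 2)).getD 0]

def pvC (q : List (Int × Int)) : List (Int × Int) :=
  q.flatMap fun p =>
    if p.1 > p.2 then []
    else [(p.1, PySem.Int.floordiv (p.1 + p.2) 2 - 1),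
          (PySem.Int.floordiv (p.1 + p.2) 2 + 1, p.2)]

def pvMeas (p : Int × Int) : Nat := 2 * (p.2 - p.1 + 1).toNat + 1
def pvMeasQ (q : List (Int × Int)) : Nat := (q.map pvMeas).sum

theorem pvC_meas : ∀ (q : List (Int × Int)),
    pvMeasQ (pvC q) + q.length ≤ pvMeasQ q := by
  intro q
  induction q with
  | nil => simp [pvC, pvMeasQ]
  | cons p r ih =>
    obtain ⟨l, h⟩ := p
    by_cases hc : l > h
    · simp only [pvC, List.flatMap_cons, hc, if_pos, List.nil_append, List.length_cons]
      simp only [pvC] at ih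
      simp only [pvMeasQ, pvMeas, List.map_cons, List.sum_cons] at ih ⊢
      omega
    · have hm := PySem.Int.floordiv_two_mid_bounds (lo := l) (hi := h) (by omega)
      simp only [pvC, List.flatMap_cons, hc, if_neg, not_false_iff, List.length_cons,
        List.cons_append, List.nil_append]
      simp only [pvC] at ih
      simp only [pvMeasQ, pvMeas, List.map_cons, List.sum_cons] at ih ⊢
      omega

theorem length_le_pvMeasQ (q : List (Int × Int)) : q.length ≤ pvMeasQ q := by
  induction q with
  | nil => simp [pvMeasQ]
  | cons p r ih => simp only [pvMeasQ, pvMeas, List.map_cons, List.sum_cons,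
      List.length_cons] at ih ⊢; omega

theorem bisectLoop_nil (seq : List Int) (f : Nat) : bisectLoop seq f [] = [] := by
  cases f <;> rfl

-- FIFO BFS = level order: the queue loop on q1 ++ q2 first yields q1's level output,
-- then continues on q2 followed by q1's children (one fuel unit per pop).
theorem bisect_key (seq : List Int) :
    ∀ (q1 : List (Int × Int)) (f : Nat) (q2 : List (Int × Int)), q1.length ≤ f →
      bisectLoop seq f (q1 ++ q2) =
        pvY seq q1 ++ bisectLoop seq (f - q1.length) (q2 ++ pvC q1) := by
  intro q1
  induction q1 with
  | nil => intro f q2 _; simp [pvY, pvC]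
  | cons p r ih =>
    intro f q2 hf
    obtain ⟨l, h⟩ := p
    cases f with
    | zero => simp at hf
    | succ f' =>
      have hr : r.length ≤ f' := by simp at hf; omega
      by_cases hc : l > h
      · rw [List.cons_append, bisectLoop]
        simp only [hc, if_pos]
        rw [ih f' q2 hr]
        simp [pvY, pvC, hc]
      · rw [List.cons_append, bisectLoop]
        simp only [hc, if_neg, not_false_iff]
        rw [show (r ++ q2) ++ [(l, PySem.Int.floordiv (l + h) 2 - 1),
              (PySem.Int.floordiv (l + h) 2 + 1, h)]
            = r ++ (q2 ++ [(l, PySem.Int.floordiv (l + h) 2 - 1),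
              (PySem.Int.floordiv (l + h) 2 + 1, h)]) from by simp]
        rw [ih f' _ hr]
        simp [pvY, pvC, hc]

-- the per-depth level lists generated by the whole queue (proof device)
def qLevels (seq : List Int) (q : List (Int × Int)) : List (List Int) :=
  if h : ∃ p ∈ q, p.1 ≤ p.2 then
    pvY seq q :: qLevels seq (pvC q)
  else []
termination_by pvMeasQ q
decreasing_by
  obtain ⟨p, hp, _⟩ := h
  have h1 := pvC_meas q
  have h2 : 1 ≤ q.length := List.length_pos_of_mem hp
  omega

theorem pvY_append (seq : List Int) (q1 q2 : List (Int × Int)) :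
    pvY seq (q1 ++ q2) = pvY seq q1 ++ pvY seq q2 := by simp [pvY]

theorem pvC_append (q1 q2 : List (Int × Int)) :
    pvC (q1 ++ q2) = pvC q1 ++ pvC q2 := by simp [pvC]

theorem pvY_empty (seq : List Int) (q : List (Int × Int))
    (h : ¬ ∃ p ∈ q, p.1 ≤ p.2) : pvY seq q = [] := by
  simp only [pvY, List.flatMap_eq_nil_iff]
  intro p hp
  push_neg at h
  simp [h p hp]

theorem pvC_empty (q : List (Int × Int))
    (h : ¬ ∃ p ∈ q, p.1 ≤ p.2) : pvC q = [] := by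
  simp only [pvC, List.flatMap_eq_nil_iff]
  intro p hp
  push_neg at h
  simp [h p hp]

theorem qLevels_empty (seq : List Int) (q : List (Int × Int))
    (h : ¬ ∃ p ∈ q, p.1 ≤ p.2) : qLevels seq q = [] := by
  rw [qLevels]; simp [h]


theorem qLevels_pos (seq : List Int) (q : List (Int × Int))
    (h : ∃ p ∈ q, p.1 ≤ p.2) :
    qLevels seq q = pvY seq q :: qLevels seq (pvC q) := by
  rw [qLevels]; simp [h]

theorem altLevels_pos (seq : List Int) (l h : Int) (hlh : ¬ l > h) :
    altLevels seq l h =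
      [(PySem.List.pyGet? seq (PySem.Int.floordiv (l + h) 2)).getD 0] ::
        pvMerge (altLevels seq l (PySem.Int.floordiv (l + h) 2 - 1))
                (altLevels seq (PySem.Int.floordiv (l + h) 2 + 1) h) := by
  rw [altLevels]; simp [hlh]

theorem altLevels_neg (seq : List Int) (l h : Int) (hlh : l > h) :
    altLevels seq l h = [] := by
  rw [altLevels]; simp [hlh]

-- queue concatenation = depth-wise merge of level lists
theorem qLevels_append (seq : List Int) :
    ∀ (n : Nat) (q1 q2 : List (Int × Int)), pvMeasQ q1 + pvMeasQ q2 ≤ n →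
      qLevels seq (q1 ++ q2) = pvMerge (qLevels seq q1) (qLevels seq q2) := by
  intro n
  induction n with
  | zero =>
    intro q1 q2 hn
    have l1 := length_le_pvMeasQ q1
    have l2 := length_le_pvMeasQ q2
    have : q1 = [] := List.length_eq_zero_iff.mp (by omega)
    have : q2 = [] := List.length_eq_zero_iff.mp (by omega)
    subst_vars
    simp [qLevels_empty seq [] (by simp), pvMerge]
  | succ n ih =>
    intro q1 q2 hn
    by_cases h1 : ∃ p ∈ q1, p.1 ≤ p.2
    · by_cases h2 : ∃ p ∈ q2, p.1 ≤ p.2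
      · -- both contribute a level
        have h12 : ∃ p ∈ q1 ++ q2, p.1 ≤ p.2 := by
          obtain ⟨p, hp, hle⟩ := h1; exact ⟨p, List.mem_append_left _ hp, hle⟩
        rw [qLevels_pos seq _ h12, qLevels_pos seq q1 h1, qLevels_pos seq q2 h2]
        rw [pvY_append, pvC_append, pvMerge]
        have hm1 := pvC_meas q1
        have hm2 := pvC_meas q2
        have hl1 : 1 ≤ q1.length := by
          obtain ⟨p, hp, _⟩ := h1; exact List.length_pos_of_mem hp
        rw [ih (pvC q1) (pvC q2) (by omega)]
      · -- q2 all-empty: right levels are [], pvC q2 = []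
        have h12 : ∃ p ∈ q1 ++ q2, p.1 ≤ p.2 := by
          obtain ⟨p, hp, hle⟩ := h1; exact ⟨p, List.mem_append_left _ hp, hle⟩
        rw [qLevels_pos seq _ h12, qLevels_pos seq q1 h1, qLevels_empty seq q2 h2]
        rw [pvY_append, pvC_append, pvY_empty seq q2 h2, pvC_empty q2 h2]
        have hm1 := pvC_meas q1
        have hl1 : 1 ≤ q1.length := by
          obtain ⟨p, hp, _⟩ := h1; exact List.length_pos_of_mem hp
        rw [ih (pvC q1) [] (by simp only [pvMeasQ, List.map_nil, List.sum_nil] at hm1 hn ⊢; omega)]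
        rw [qLevels_empty seq [] (by simp)]
        cases hq : qLevels seq (pvC q1) <;> simp [pvMerge]
    · -- q1 all-empty
      rw [qLevels_empty seq q1 h1]
      have : qLevels seq (q1 ++ q2) = qLevels seq q2 := by
        by_cases h2 : ∃ p ∈ q2, p.1 ≤ p.2
        · have h12 : ∃ p ∈ q1 ++ q2, p.1 ≤ p.2 := by
            obtain ⟨p, hp, hle⟩ := h2; exact ⟨p, List.mem_append_right _ hp, hle⟩
          rw [qLevels_pos seq _ h12, qLevels_pos seq q2 h2]
          rw [pvY_append, pvC_append, pvY_empty seq q1 h1, pvC_empty q1 h1]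
          simp
        · rw [qLevels_empty seq q2 h2, qLevels_empty]
          push_neg at h1 h2
          rintro ⟨p, hp, hle⟩
          rcases List.mem_append.mp hp with hm | hm
          · exact absurd hle (not_le.mpr (h1 p hm))
          · exact absurd hle (not_le.mpr (h2 p hm))
      rw [this, pvMerge]

-- the queue levels of a single interval are B's recursive levels
theorem qLevels_single (seq : List Int) :
    ∀ (n : Nat) (l h : Int), (h - l + 1).toNat ≤ n →
      qLevels seq [(l, h)] = altLevels seq l h := by
  intro n
  induction n with
  | zero =>
    intro l h hn
    have hlh : l > h := by omega
    rw [qLevels_empty seq _ (by rintro ⟨p, hp, hle⟩; simp at hp; subst hp; omega)]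
    rw [altLevels]; simp [hlh]
  | succ n ih =>
    intro l h hn
    by_cases hlh : l > h
    · rw [qLevels_empty seq _ (by rintro ⟨p, hp, hle⟩; simp at hp; subst hp; omega)]
      rw [altLevels_neg seq l h hlh]
    · have hm := PySem.Int.floordiv_two_mid_bounds (lo := l) (hi := h) (by omega)
      rw [qLevels_pos seq [(l, h)] ⟨(l, h), by simp, by omega⟩]
      simp only [pvY, pvC, List.flatMap_cons, List.flatMap_nil, List.append_nil]
      rw [if_neg (by simp; omega), if_neg (by simp; omega)]
      rw [show [(l, PySem.Int.floordiv (l + h) 2 - 1),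
                (PySem.Int.floordiv (l + h) 2 + 1, h)]
            = [(l, PySem.Int.floordiv (l + h) 2 - 1)] ++
              [(PySem.Int.floordiv (l + h) 2 + 1, h)] from rfl]
      rw [qLevels_append seq (pvMeasQ [(l, PySem.Int.floordiv (l + h) 2 - 1)] +
            pvMeasQ [(PySem.Int.floordiv (l + h) 2 + 1, h)]) _ _ le_rfl]
      rw [ih l (PySem.Int.floordiv (l + h) 2 - 1) (by omega),
          ih (PySem.Int.floordiv (l + h) 2 + 1) h (by omega)]
      rw [altLevels_pos seq l h hlh]

-- A's queue loop flattens the queue's level lists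
theorem bisectLoop_flatten (seq : List Int) :
    ∀ (n : Nat) (q : List (Int × Int)) (f : Nat), pvMeasQ q ≤ n → pvMeasQ q ≤ f →
      bisectLoop seq f q = (qLevels seq q).flatten := by
  intro n
  induction n with
  | zero =>
    intro q f hn hf
    have := length_le_pvMeasQ q
    have : q = [] := List.length_eq_zero_iff.mp (by omega)
    subst this
    rw [bisectLoop_nil, qLevels_empty seq [] (by simp)]
    rfl
  | succ n ih =>
    intro q f hn hf
    by_cases h : ∃ p ∈ q, p.1 ≤ p.2
    · rw [qLevels, dif_pos h]
      have hkey := bisect_key seq q f [] (le_trans (length_le_pvMeasQ q) hf)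
      simp only [List.append_nil, List.nil_append] at hkey
      rw [hkey]
      have hm := pvC_meas q
      have hl : 1 ≤ q.length := by
        obtain ⟨p, hp, _⟩ := h; exact List.length_pos_of_mem hp
      rw [ih (pvC q) (f - q.length) (by omega) (by omega)]
      simp
    · rw [qLevels_empty seq q h]
      have hkey := bisect_key seq q f [] (le_trans (length_le_pvMeasQ q) hf)
      simp only [List.append_nil, List.nil_append] at hkey
      rw [hkey, pvY_empty seq q h, pvC_empty q h, bisectLoop_nil]
      rfl

-- ===== VERDICT =====
theorem bisect_spec : Claim_equal_bisect := by
  intro sequence _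
  unfold Spec_bisect bisect bisect_alt
  rw [bisectLoop_flatten sequence (pvMeasQ [(0, (sequence.length : Int) - 1)]) _ _
        le_rfl (by simp [pvMeasQ, pvMeas])]
  rw [qLevels_single sequence sequence.length 0 ((sequence.length : Int) - 1) (by omega)]
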